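-- pv_equiv track=rewrite | github.com/mr-ahtashamulhaq/python_repo | Data Structure and Algorithm/Problem_257_Minimum InsertionsDeletions to Convert String.py | minDistance_tabuSpaceOpt
-- ===== SOURCE A (Python) =====
-- def minDistance_tabuSpaceOpt(text1: str, text2: str):
--     n1 = len(text1)
--     n2 = len(text2)
--     prev = [-1 for _ in range(n2 + 1)]
--
--     for ind2 in range(n2 + 1):
--         prev[ind2] = 0
--
--     for ind1 in range(1, n1 + 1):
--         curr = [-1 for _ in range(n2 + 1)]
--         curr[0] = 0                  # everytime make new row its first will be zero
--         for ind2 in range(1, n2 + 1):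
--             if text1[ind1 - 1] == text2[ind2 - 1]:
--                 curr[ind2] = 1 + prev[ind2 - 1]
--             else:
--                 curr[ind2] = 0 + max(prev[ind2], curr[ind2 - 1])
--
--         prev = curr.copy()
--     return (n1 - prev[n2]) + (n2 - prev[n2])
-- ===== SOURCE B (Python) =====
-- def minDistance_tabuSpaceOpt(text1: str, text2: str):
--     # Compute the insertion/deletion edit distance directly with a single
--     # in-place array (min-recurrence), instead of an LCS max-DP with two rows.
--     n1, n2 = len(text1), len(text2)
--     dp = list(range(n2 + 1))          # dist(0, j) = j
--     for i in range(1, n1 + 1):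
--         diag, dp[0] = dp[0], i        # dist(i, 0) = i
--         for j in range(1, n2 + 1):
--             diag, dp[j] = dp[j], (diag if text1[i - 1] == text2[j - 1]
--                                   else 1 + min(dp[j], dp[j - 1]))
--     return dp[n2]
-- ===== Notes on version B (the rewrite author's own statement) =====
-- stated objective: alternative
-- what changed: B computes the insertion/deletion edit distance directly via a min-recurrence over a single in-place array (with a diagonal carry), instead of A's LCS max-DP with two rows and the (n1-L)+(n2-L) formula.
import Mathlib
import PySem

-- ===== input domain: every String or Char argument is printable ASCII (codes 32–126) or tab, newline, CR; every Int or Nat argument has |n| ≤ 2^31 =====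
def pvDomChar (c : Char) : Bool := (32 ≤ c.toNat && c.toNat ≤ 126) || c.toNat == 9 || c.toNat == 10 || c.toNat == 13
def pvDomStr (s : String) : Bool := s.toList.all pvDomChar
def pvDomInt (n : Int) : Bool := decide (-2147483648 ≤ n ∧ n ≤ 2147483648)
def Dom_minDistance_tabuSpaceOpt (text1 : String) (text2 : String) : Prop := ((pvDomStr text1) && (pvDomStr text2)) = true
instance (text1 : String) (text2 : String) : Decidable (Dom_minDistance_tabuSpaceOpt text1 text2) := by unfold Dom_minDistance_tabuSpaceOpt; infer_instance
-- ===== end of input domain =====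

-- B computes the insertion/deletion edit distance directly with a single in-place
-- array and a min-recurrence, instead of A's two-row LCS max-DP plus the
-- (n1-L)+(n2-L) formula; same asymptotic cost, genuinely different algorithm.

-- ===== PORT A =====
-- inner row loop of A: for ind2 in range(1, n2+1) filling curr; string indices are
-- always in range so List.getD's default is never used
def pvInnerA (t1 t2 : List Char) (ind1' : Nat) (prev : List Int) : List Int :=
  (List.range t2.length).foldl
    (fun curr ind2' =>
      if t1.getD ind1' ' ' = t2.getD ind2' ' ' then
        curr.set (ind2' + 1) (1 + prev.getD ind2' (-1))
      else
        curr.set (ind2' + 1) (0 + max (prev.getD (ind2' + 1) (-1)) (curr.getD ind2' (-1))))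
    ((List.replicate (t2.length + 1) (-1 : Int)).set 0 0)

-- outer loop of A: prev initialised to -1s then zeroed index by index, then one row per char of text1
def pvOuterA (t1 t2 : List Char) : List Int :=
  (List.range t1.length).foldl (fun prev ind1' => pvInnerA t1 t2 ind1' prev)
    ((List.range (t2.length + 1)).foldl (fun p ind2 => p.set ind2 (0 : Int))
      (List.replicate (t2.length + 1) (-1 : Int)))

def minDistance_tabuSpaceOpt (text1 : String) (text2 : String) : Int :=
  let t1 := text1.toList
  let t2 := text2.toList
  let prev := pvOuterA t1 t2
  ((t1.length : Int) - prev.getD t2.length (-1)) + ((t2.length : Int) - prev.getD t2.length (-1))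

-- ===== PORT B =====
-- inner loop of B: state = (diag carry, dp array), dp updated in place
def pvInnerB (t1 t2 : List Char) (i' : Nat) (dp : List Int) : List Int :=
  ((List.range t2.length).foldl
    (fun (st : Int × List Int) j' =>
      let v := if t1.getD i' ' ' = t2.getD j' ' ' then st.1
               else 1 + min (st.2.getD (j' + 1) 0) (st.2.getD j' 0)
      (st.2.getD (j' + 1) 0, st.2.set (j' + 1) v))
    (dp.getD 0 0, dp.set 0 ((i' : Int) + 1))).2

def minDistance_tabuSpaceOpt_alt (text1 : String) (text2 : String) : Int :=
  let t1 := text1.toList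
  let t2 := text2.toList
  let dp := (List.range t1.length).foldl (fun dp i' => pvInnerB t1 t2 i' dp)
              ((List.range (t2.length + 1)).map (fun j => Int.ofNat j))
  dp.getD t2.length 0

-- ===== PRECONDITION & SPEC =====
def Spec_minDistance_tabuSpaceOpt (text1 : String) (text2 : String) (out : Int) : Prop := out = minDistance_tabuSpaceOpt_alt text1 text2
instance (text1 : String) (text2 : String) (out : Int) : Decidable (Spec_minDistance_tabuSpaceOpt text1 text2 out) := by unfold Spec_minDistance_tabuSpaceOpt; infer_instance

-- ===== CLAIM (what is proved, stated in full; the proofs are below) =====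
def Claim_equal_minDistance_tabuSpaceOpt : Prop := ∀ (text1 : String) (text2 : String), Dom_minDistance_tabuSpaceOpt text1 text2 → Spec_minDistance_tabuSpaceOpt text1 text2 (minDistance_tabuSpaceOpt text1 text2)

-- ===== LEMMAS AND PROOFS =====

-- reference recursive LCS over prefix lengths (proof-only)
def lcsR (t1 t2 : List Char) : Nat → Nat → Int
  | 0, _ => 0
  | _ + 1, 0 => 0
  | i + 1, j + 1 =>
      if t1.getD i ' ' = t2.getD j ' ' then 1 + lcsR t1 t2 i j
      else max (lcsR t1 t2 i (j + 1)) (lcsR t1 t2 (i + 1) j)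
termination_by i j => i + j

-- reference recursive insert/delete distance (proof-only)
def distR (t1 t2 : List Char) : Nat → Nat → Int
  | 0, j => (j : Int)
  | i + 1, 0 => (i : Int) + 1
  | i + 1, j + 1 =>
      if t1.getD i ' ' = t2.getD j ' ' then distR t1 t2 i j
      else 1 + min (distR t1 t2 i (j + 1)) (distR t1 t2 (i + 1) j)
termination_by i j => i + j

lemma dist_eq_lcs (t1 t2 : List Char) : ∀ i j, distR t1 t2 i j = (i : Int) + j - 2 * lcsR t1 t2 i j := by
  intro i j
  induction i, j using lcsR.induct t1 t2 with
  | case1 j => simp [distR, lcsR]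
  | case2 i => simp [distR, lcsR]
  | case3 i j heq ih =>
    rw [distR, lcsR, if_pos heq, if_pos heq, ih]
    push_cast; ring
  | case4 i j hne ih1 ih2 =>
    rw [distR, lcsR, if_neg hne, if_neg hne, ih1, ih2]
    push_cast; omega

lemma getD_set_self (l : List Int) (i : Nat) (a d : Int) (h : i < l.length) :
    (l.set i a).getD i d = a := by
  simp [List.getD, h]

lemma getD_set_ne (l : List Int) (i j : Nat) (a d : Int) (h : i ≠ j) :
    (l.set i a).getD j d = l.getD j d := by
  simp [List.getD, List.getElem?_set_ne h]

lemma initA_len (n : Nat) (l : List Int) :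
    ((List.range n).foldl (fun p ind2 => p.set ind2 (0 : Int)) l).length = l.length := by
  induction n with
  | zero => simp
  | succ k ih => rw [List.range_succ, List.foldl_append]; simp [ih]

lemma initA_getD (n : Nat) : ∀ (l : List Int) (j : Nat), j < n → n ≤ l.length →
    ((List.range n).foldl (fun p ind2 => p.set ind2 (0 : Int)) l).getD j (-1) = 0 := by
  induction n with
  | zero => intro l j h; omega
  | succ k ih =>
    intro l j hj hn
    rw [List.range_succ, List.foldl_append]
    simp only [List.foldl_cons, List.foldl_nil]
    rcases Nat.lt_or_ge j k with h | h
    · rw [getD_set_ne _ _ _ _ _ (by omega), ih l j h (by omega)]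
    · have hjk : j = k := by omega
      subst hjk
      rw [getD_set_self]
      rw [initA_len]; omega

lemma innerA_aux (t1 t2 : List Char) (i : Nat) (prev : List Int)
    (_hlen : prev.length = t2.length + 1)
    (hprev : ∀ j, j ≤ t2.length → prev.getD j (-1) = lcsR t1 t2 i j) :
    ∀ m, m ≤ t2.length →
    (((List.range m).foldl
      (fun curr ind2' =>
        if t1.getD i ' ' = t2.getD ind2' ' ' then
          curr.set (ind2' + 1) (1 + prev.getD ind2' (-1))
        else
          curr.set (ind2' + 1) (0 + max (prev.getD (ind2' + 1) (-1)) (curr.getD ind2' (-1))))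
      ((List.replicate (t2.length + 1) (-1 : Int)).set 0 0)).length = t2.length + 1) ∧
    ∀ j, j ≤ m →
    ((List.range m).foldl
      (fun curr ind2' =>
        if t1.getD i ' ' = t2.getD ind2' ' ' then
          curr.set (ind2' + 1) (1 + prev.getD ind2' (-1))
        else
          curr.set (ind2' + 1) (0 + max (prev.getD (ind2' + 1) (-1)) (curr.getD ind2' (-1))))
      ((List.replicate (t2.length + 1) (-1 : Int)).set 0 0)).getD j (-1) = lcsR t1 t2 (i + 1) j := by
  intro m
  induction m with
  | zero =>
    intro _
    simp only [List.range_zero, List.foldl_nil]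
    refine ⟨by simp, ?_⟩
    intro j hj
    have hj0 : j = 0 := by omega
    subst hj0
    rw [getD_set_self _ _ _ _ (by simp)]
    simp [lcsR]
  | succ k ih =>
    intro hk
    obtain ⟨ihlen, ihval⟩ := ih (by omega)
    rw [List.range_succ, List.foldl_append, List.foldl_cons, List.foldl_nil]
    constructor
    · split_ifs with h <;> rw [List.length_set, ihlen]
    · intro j hj
      by_cases hj1 : j = k + 1
      · subst hj1
        split_ifs with h
        · rw [getD_set_self _ _ _ _ (by rw [ihlen]; omega),
              hprev k (by omega), lcsR, if_pos h]
        · rw [getD_set_self _ _ _ _ (by rw [ihlen]; omega),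
              hprev (k + 1) (by omega), ihval k (by omega), lcsR, if_neg h]
          omega
      · have hj2 : j ≤ k := by omega
        split_ifs with h
        · rw [getD_set_ne _ _ _ _ _ (by omega), ihval j hj2]
        · rw [getD_set_ne _ _ _ _ _ (by omega), ihval j hj2]

lemma innerA_spec (t1 t2 : List Char) (i : Nat) (prev : List Int)
    (_hlen : prev.length = t2.length + 1)
    (hprev : ∀ j, j ≤ t2.length → prev.getD j (-1) = lcsR t1 t2 i j) :
    (pvInnerA t1 t2 i prev).length = t2.length + 1 ∧
    ∀ j, j ≤ t2.length → (pvInnerA t1 t2 i prev).getD j (-1) = lcsR t1 t2 (i + 1) j := by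
  unfold pvInnerA
  exact innerA_aux t1 t2 i prev _hlen hprev t2.length le_rfl

lemma outerA_spec (t1 t2 : List Char) : ∀ n,
    (((List.range n).foldl (fun prev ind1' => pvInnerA t1 t2 ind1' prev)
      ((List.range (t2.length + 1)).foldl (fun p ind2 => p.set ind2 (0 : Int))
        (List.replicate (t2.length + 1) (-1 : Int)))).length = t2.length + 1) ∧
    ∀ j, j ≤ t2.length →
    ((List.range n).foldl (fun prev ind1' => pvInnerA t1 t2 ind1' prev)
      ((List.range (t2.length + 1)).foldl (fun p ind2 => p.set ind2 (0 : Int))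
        (List.replicate (t2.length + 1) (-1 : Int)))).getD j (-1) = lcsR t1 t2 n j := by
  intro n
  induction n with
  | zero =>
    simp only [List.range_zero, List.foldl_nil]
    refine ⟨by rw [initA_len]; simp, ?_⟩
    intro j hj
    rw [initA_getD _ _ _ (by omega) (by simp)]
    simp [lcsR]
  | succ n ih =>
    set init := (List.range (t2.length + 1)).foldl (fun p ind2 => p.set ind2 (0 : Int))
      (List.replicate (t2.length + 1) (-1 : Int)) with hinit
    rw [List.range_succ, List.foldl_append, List.foldl_cons, List.foldl_nil]
    exact innerA_spec t1 t2 n _ ih.1 ih.2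

lemma innerB_aux (t1 t2 : List Char) (i : Nat) (dp : List Int)
    (hlen : dp.length = t2.length + 1)
    (hdp : ∀ j, j ≤ t2.length → dp.getD j 0 = distR t1 t2 i j) :
    ∀ m, m ≤ t2.length →
    (((List.range m).foldl
      (fun (st : Int × List Int) j' =>
        let v := if t1.getD i ' ' = t2.getD j' ' ' then st.1
                 else 1 + min (st.2.getD (j' + 1) 0) (st.2.getD j' 0)
        (st.2.getD (j' + 1) 0, st.2.set (j' + 1) v))
      (dp.getD 0 0, dp.set 0 ((i : Int) + 1))).1 = distR t1 t2 i m) ∧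
    (((List.range m).foldl
      (fun (st : Int × List Int) j' =>
        let v := if t1.getD i ' ' = t2.getD j' ' ' then st.1
                 else 1 + min (st.2.getD (j' + 1) 0) (st.2.getD j' 0)
        (st.2.getD (j' + 1) 0, st.2.set (j' + 1) v))
      (dp.getD 0 0, dp.set 0 ((i : Int) + 1))).2.length = t2.length + 1) ∧
    ∀ j, j ≤ t2.length →
    ((List.range m).foldl
      (fun (st : Int × List Int) j' =>
        let v := if t1.getD i ' ' = t2.getD j' ' ' then st.1
                 else 1 + min (st.2.getD (j' + 1) 0) (st.2.getD j' 0)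
        (st.2.getD (j' + 1) 0, st.2.set (j' + 1) v))
      (dp.getD 0 0, dp.set 0 ((i : Int) + 1))).2.getD j 0 =
      if j ≤ m then distR t1 t2 (i + 1) j else distR t1 t2 i j := by
  intro m
  induction m with
  | zero =>
    intro _
    simp only [List.range_zero, List.foldl_nil]
    refine ⟨?_, by simp [hlen], ?_⟩
    · simpa using hdp 0 (by omega)
    · intro j hj
      by_cases hj0 : j = 0
      · subst hj0
        rw [getD_set_self _ _ _ _ (by omega)]
        simp [distR]
      · rw [getD_set_ne _ _ _ _ _ (by omega), if_neg (by omega : ¬ (j ≤ 0))]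
        exact hdp j hj
  | succ k ih =>
    intro hk
    obtain ⟨ih1, ih2, ih3⟩ := ih (by omega)
    rw [List.range_succ, List.foldl_append, List.foldl_cons, List.foldl_nil]
    set st := (List.range k).foldl
      (fun (st : Int × List Int) j' =>
        let v := if t1.getD i ' ' = t2.getD j' ' ' then st.1
                 else 1 + min (st.2.getD (j' + 1) 0) (st.2.getD j' 0)
        (st.2.getD (j' + 1) 0, st.2.set (j' + 1) v))
      (dp.getD 0 0, dp.set 0 ((i : Int) + 1)) with hst
    dsimp only
    have hv : (if t1.getD i ' ' = t2.getD k ' ' then st.1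
               else 1 + min (st.2.getD (k + 1) 0) (st.2.getD k 0)) =
        distR t1 t2 (i + 1) (k + 1) := by
      rw [distR]
      split_ifs with h
      · exact ih1
      · rw [ih3 (k + 1) (by omega), ih3 k (by omega)]
        have h1 : ¬ (k + 1 ≤ k) := by omega
        simp only [h1, if_false, le_refl, if_true]
    refine ⟨?_, by rw [List.length_set, ih2], ?_⟩
    · rw [ih3 (k + 1) (by omega)]
      have h1 : ¬ (k + 1 ≤ k) := by omega
      simp only [h1, if_false]
    · intro j hj
      by_cases hj1 : j = k + 1
      · subst hj1
        rw [getD_set_self _ _ _ _ (by rw [ih2]; omega), hv]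
        simp
      · rw [getD_set_ne _ _ _ _ _ (by omega), ih3 j hj]
        split_ifs <;> first | rfl | omega

lemma innerB_spec (t1 t2 : List Char) (i : Nat) (dp : List Int)
    (hlen : dp.length = t2.length + 1)
    (hdp : ∀ j, j ≤ t2.length → dp.getD j 0 = distR t1 t2 i j) :
    (pvInnerB t1 t2 i dp).length = t2.length + 1 ∧
    ∀ j, j ≤ t2.length → (pvInnerB t1 t2 i dp).getD j 0 = distR t1 t2 (i + 1) j := by
  obtain ⟨-, h2, h3⟩ := innerB_aux t1 t2 i dp hlen hdp t2.length le_rfl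
  unfold pvInnerB
  refine ⟨h2, ?_⟩
  intro j hj
  rw [h3 j hj, if_pos hj]

lemma initB_getD (n j : Nat) (hj : j < n) :
    ((List.range n).map (fun j => Int.ofNat j)).getD j 0 = (j : Int) := by
  have h : j < ((List.range n).map (fun j => Int.ofNat j)).length := by simpa using hj
  rw [List.getD_eq_getElem _ _ h]
  simp

lemma outerB_spec (t1 t2 : List Char) : ∀ n,
    (((List.range n).foldl (fun dp i' => pvInnerB t1 t2 i' dp)
      ((List.range (t2.length + 1)).map (fun j => Int.ofNat j))).length = t2.length + 1) ∧
    ∀ j, j ≤ t2.length →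
    ((List.range n).foldl (fun dp i' => pvInnerB t1 t2 i' dp)
      ((List.range (t2.length + 1)).map (fun j => Int.ofNat j))).getD j 0 = distR t1 t2 n j := by
  intro n
  induction n with
  | zero =>
    simp only [List.range_zero, List.foldl_nil]
    refine ⟨by simp, ?_⟩
    intro j hj
    rw [initB_getD _ _ (by omega)]
    simp [distR]
  | succ n ih =>
    set init := (List.range (t2.length + 1)).map (fun j => Int.ofNat j) with hinit
    rw [List.range_succ, List.foldl_append, List.foldl_cons, List.foldl_nil]
    exact innerB_spec t1 t2 n _ ih.1 ih.2

-- ===== VERDICT (by name: the statement is the Claim_ definition above) =====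
theorem minDistance_tabuSpaceOpt_spec : Claim_equal_minDistance_tabuSpaceOpt := by
  intro text1 text2 _
  unfold Spec_minDistance_tabuSpaceOpt minDistance_tabuSpaceOpt minDistance_tabuSpaceOpt_alt
  have hA := (outerA_spec text1.toList text2.toList text1.toList.length).2 text2.toList.length le_rfl
  have hB := (outerB_spec text1.toList text2.toList text1.toList.length).2 text2.toList.length le_rfl
  simp only [pvOuterA] at *
  rw [hA, hB, dist_eq_lcs]
  ring
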